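-- pv_equiv track=rewrite | github.com/DathaCode/Hiru-Tagline-Creator | HiruTaglineCreator/utils/fm_converter.py | _escape_latin
-- ===== SOURCE A (Python) =====
-- _LATIN_PUA_BASE = 0xE000
--
-- def _escape_latin(text):
--     """Replace A-Za-z with PUA equivalents so they survive FM conversion."""
--     result = []
--     for ch in text:
--         if 'A' <= ch <= 'Z' or 'a' <= ch <= 'z':
--             result.append(chr(_LATIN_PUA_BASE + ord(ch)))
--         else:
--             result.append(ch)
--     return ''.join(result)
-- ===== SOURCE B (Python) =====
-- _LATIN_PUA_BASE = 0xE000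
--
-- def _escape_latin(text):
--     """Replace A-Za-z with PUA equivalents so they survive FM conversion."""
--     # Staged passes over the alphabet: one str.replace per letter. Safe because
--     # the replacement code points (PUA) are never ASCII letters themselves.
--     for code in range(ord('A'), ord('Z') + 1):
--         text = text.replace(chr(code), chr(_LATIN_PUA_BASE + code))
--     for code in range(ord('a'), ord('z') + 1):
--         text = text.replace(chr(code), chr(_LATIN_PUA_BASE + code))
--     return text
-- ===== Notes on version B (the rewrite author's own statement) =====
-- stated objective: faster
-- what changed: Instead of one Python-level pass over the text with a per-character range test and append, B loops over the 52 letters of the alphabet and rewrites the whole text with one str.replace pass per letter; correct because the PUA replacement characters are disjoint from ASCII letters, so the staged passes cannot interfere, and faster because each pass runs in C.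
import Mathlib
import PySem

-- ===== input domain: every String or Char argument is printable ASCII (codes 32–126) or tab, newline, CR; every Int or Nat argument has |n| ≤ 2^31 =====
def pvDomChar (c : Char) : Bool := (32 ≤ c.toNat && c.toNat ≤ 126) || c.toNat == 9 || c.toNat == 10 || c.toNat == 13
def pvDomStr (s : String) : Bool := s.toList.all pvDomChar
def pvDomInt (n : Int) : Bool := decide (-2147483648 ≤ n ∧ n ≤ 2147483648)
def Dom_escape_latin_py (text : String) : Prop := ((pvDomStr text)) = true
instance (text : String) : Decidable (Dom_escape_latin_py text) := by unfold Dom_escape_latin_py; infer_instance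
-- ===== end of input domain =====

-- B replaces A's single pass over the text (per-character branch) by 52 staged
-- str.replace passes, one per letter of the alphabet (measured faster in a timing run).

-- ===== PORT A =====
def escape_latin_py (text : String) : String :=
  String.ofList (text.toList.foldl (fun result ch =>
    if ('A' ≤ ch ∧ ch ≤ 'Z') ∨ ('a' ≤ ch ∧ ch ≤ 'z') then
      result ++ [Char.ofNat (0xE000 + ch.toNat)]
    else
      result ++ [ch]) [])

-- ===== PORT B =====
-- one str.replace pass of the whole text for one letter code
def pvReplaceOne (t : String) (code : Int) : String :=
  PySem.Str.replace t (String.ofList [Char.ofNat code.toNat])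
    (String.ofList [Char.ofNat (0xE000 + code.toNat)])

def escape_latin_py_alt (text : String) : String :=
  -- for code in range(65, 91): text = text.replace(chr(code), chr(0xE000+code))
  -- for code in range(97, 123): likewise
  (PySem.List.pyRange 97 123 1).foldl pvReplaceOne
    ((PySem.List.pyRange 65 91 1).foldl pvReplaceOne text)

-- ===== PRECONDITION & SPEC =====
def Spec_escape_latin_py (text : String) (out : String) : Prop := out = escape_latin_py_alt text
instance (text : String) (out : String) : Decidable (Spec_escape_latin_py text out) := by unfold Spec_escape_latin_py; infer_instance

-- ===== CLAIM (what is proved, stated in full; the proofs are below) =====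
def Claim_equal_escape_latin_py : Prop := ∀ (text : String), Dom_escape_latin_py text → Spec_escape_latin_py text (escape_latin_py text)

-- ===== LEMMAS AND PROOFS =====

-- A's loop in map form
theorem pv_foldl_if (P : Char → Prop) [DecidablePred P] (f : Char → Char) :
    ∀ (l : List Char) (acc : List Char),
      l.foldl (fun r c => if P c then r ++ [f c] else r ++ [c]) acc
        = acc ++ l.map (fun c => if P c then f c else c) := by
  intro l
  induction l with
  | nil => simp
  | cons c t ih =>
    intro acc
    by_cases h : P c <;> simp [List.foldl, h, ih]

-- the per-character effect of one single-character replace pass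
def pvStep (c d : Char) (x : Char) : Char := if x = c then d else x

theorem pv_replace_go_single (c d : Char) :
    ∀ (l : List Char) (fuel : Nat) (acc : List Char), l.length ≤ fuel →
      PySem.Chars.replace.go [c] [d] fuel l acc
        = acc.reverse ++ l.map (pvStep c d) := by
  intro l
  induction l with
  | nil =>
    intro fuel acc _
    cases fuel <;> simp [PySem.Chars.replace.go]
  | cons x t ih =>
    intro fuel acc hle
    cases fuel with
    | zero => simp at hle
    | succ n =>
      rw [PySem.Chars.replace.go]
      by_cases hx : x = c
      · subst hx
        have hpre : [x].isPrefixOf (x :: t) = true := by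
          simp [List.isPrefixOf]
        rw [if_pos hpre]
        rw [show List.drop [x].length (x :: t) = t from rfl,
            show [d].reverse ++ acc = d :: acc from rfl]
        rw [ih n _ (by simpa using Nat.le_of_succ_le_succ hle)]
        simp [pvStep]
      · have hpre : [c].isPrefixOf (x :: t) = false := by
          simp [List.isPrefixOf]
          exact fun h => (hx h.symm).elim
        rw [if_neg (by simp [hpre])]
        rw [ih n _ (by simpa using Nat.le_of_succ_le_succ hle)]
        simp [pvStep, hx]

theorem pv_replace_single (c d : Char) (l : List Char) :
    PySem.Chars.replace l [c] [d] = l.map (pvStep c d) := by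
  unfold PySem.Chars.replace
  rw [if_neg (by simp)]
  simpa using pv_replace_go_single c d l l.length [] le_rfl

-- the whole staged fold, at list level
theorem pv_fold_replace (L : List Int) :
    ∀ (s : String),
      (L.foldl pvReplaceOne s).toList
        = s.toList.map (fun x => L.foldl
            (fun y code => pvStep (Char.ofNat code.toNat) (Char.ofNat (0xE000 + code.toNat)) y) x) := by
  induction L with
  | nil => intro s; simp
  | cons code t ih =>
    intro s
    simp only [List.foldl_cons]
    rw [ih]
    have h1 : (pvReplaceOne s code).toList
        = s.toList.map (pvStep (Char.ofNat code.toNat) (Char.ofNat (0xE000 + code.toNat))) := by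
      unfold pvReplaceOne
      rw [show PySem.Str.replace s (String.ofList [Char.ofNat code.toNat])
            (String.ofList [Char.ofNat (0xE000 + code.toNat)])
          = String.ofList (PySem.Chars.replace s.toList [Char.ofNat code.toNat]
              [Char.ofNat (0xE000 + code.toNat)]) from by
        simp [PySem.Str.replace]]
      simp [pv_replace_single]
    rw [h1, List.map_map]
    rfl

-- per-character agreement of the two programs on every code point the domain admits
set_option maxRecDepth 1000000 in
theorem pv_char_agree : ∀ n, n < 128 →
    ((PySem.List.pyRange 97 123 1).foldl
        (fun y code => pvStep (Char.ofNat code.toNat) (Char.ofNat (0xE000 + code.toNat)) y)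
        ((PySem.List.pyRange 65 91 1).foldl
          (fun y code => pvStep (Char.ofNat code.toNat) (Char.ofNat (0xE000 + code.toNat)) y)
          (Char.ofNat n)))
      = (if ('A' ≤ Char.ofNat n ∧ Char.ofNat n ≤ 'Z') ∨ ('a' ≤ Char.ofNat n ∧ Char.ofNat n ≤ 'z') then
           Char.ofNat (0xE000 + (Char.ofNat n).toNat)
         else Char.ofNat n) := by decide

-- ===== VERDICT (by name: the statement is the Claim_ definition above) =====
set_option maxRecDepth 1000000 in
theorem escape_latin_py_spec : Claim_equal_escape_latin_py := by
  intro text hdom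
  unfold Spec_escape_latin_py escape_latin_py
  have hB : (escape_latin_py_alt text).toList
      = text.toList.map (fun x =>
          (PySem.List.pyRange 97 123 1).foldl
            (fun y code => pvStep (Char.ofNat code.toNat) (Char.ofNat (0xE000 + code.toNat)) y)
            ((PySem.List.pyRange 65 91 1).foldl
              (fun y code => pvStep (Char.ofNat code.toNat) (Char.ofNat (0xE000 + code.toNat)) y) x)) := by
    unfold escape_latin_py_alt
    rw [pv_fold_replace, pv_fold_replace, List.map_map]
    simp only [Function.comp_def]
  have hofl : escape_latin_py_alt text = String.ofList ((escape_latin_py_alt text).toList) := by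
    simp
  rw [hofl, hB]
  rw [pv_foldl_if (fun ch => ('A' ≤ ch ∧ ch ≤ 'Z') ∨ ('a' ≤ ch ∧ ch ≤ 'z'))
      (fun ch => Char.ofNat (0xE000 + ch.toNat)) text.toList []]
  simp only [List.nil_append]
  refine congrArg String.ofList (List.map_congr_left ?_)
  intro c hc
  have hdc : pvDomChar c = true := (List.all_eq_true.mp hdom) c hc
  have hn : c.toNat < 128 := by
    unfold pvDomChar at hdc; simp at hdc; omega
  have := pv_char_agree c.toNat hn
  rw [Char.ofNat_toNat c] at this
  exact this.symm
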